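-- pv_equiv track=rewrite | github.com/adonai-luque/CodewarsPython | 7 kyu/howManyUrinalsAreFree.py | get_free_urinals
-- ===== SOURCE A (Python) =====
-- def uncomfortableClose(s):
--     if '11' in s:
--         return True
--     return False
--
-- def insertOne(s, i):
--     return s[:i] + '1' + s[i+1:]
--
-- def get_free_urinals(urinals):
--     initialCount = urinals.count('1')
--     if uncomfortableClose(urinals):
--         return -1
--     else:
--         for i in range(len(urinals)):
--             if not uncomfortableClose(insertOne(urinals, i)):
--                 urinals = insertOne(urinals, i)
--         return urinals.count('1') - initialCount
-- ===== SOURCE B (Python) =====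
-- def get_free_urinals(urinals):
--     if '11' in urinals:
--         return -1
--     chars = list(urinals)
--     added = 0
--     prev = ''
--     for i, c in enumerate(chars):
--         nxt = urinals[i + 1] if i + 1 < len(urinals) else ''
--         if prev != '1' and nxt != '1':
--             if c != '1':
--                 added += 1
--             chars[i] = '1'
--         prev = chars[i]
--     return added
-- ===== Notes on version B (the rewrite author's own statement) =====
-- stated objective: faster
-- what changed: Replaced A's per-position full-string adjacency rescan and slice-rebuild with a single left-to-right pass that tracks the previous (possibly upgraded) cell and the next original cell, counting upgrades incrementally.
import Mathlib
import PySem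

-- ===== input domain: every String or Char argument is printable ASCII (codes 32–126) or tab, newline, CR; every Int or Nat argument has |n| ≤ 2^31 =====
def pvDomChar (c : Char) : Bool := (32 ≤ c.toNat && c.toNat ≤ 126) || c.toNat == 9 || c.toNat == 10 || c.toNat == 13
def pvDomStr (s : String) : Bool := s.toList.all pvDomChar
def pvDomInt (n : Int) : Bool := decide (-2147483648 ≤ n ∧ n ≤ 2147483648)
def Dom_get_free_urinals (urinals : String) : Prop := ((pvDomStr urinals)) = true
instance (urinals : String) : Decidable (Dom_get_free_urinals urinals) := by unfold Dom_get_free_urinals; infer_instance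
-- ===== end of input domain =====

-- B replaces A's quadratic rescan-after-every-insert greedy with one linear pass tracking the previous cell; same return value everywhere.

-- ===== PORT A =====
def pvUncomfortableClose (s : List Char) : Bool := PySem.Chars.isIn ['1', '1'] s

def pvInsertOne (s : List Char) (i : Int) : List Char :=
  PySem.List.slice s none (some i) ++ ['1'] ++ PySem.List.slice s (some (i + 1)) none

def get_free_urinals (urinals : String) : Int :=
  let s := urinals.toList
  let initialCount : Int := (PySem.Chars.count s ['1'] : Int)
  if pvUncomfortableClose s then -1
  else
    let final := (PySem.List.pyRange 0 (s.length : Int)).foldl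
      (fun t i => if ¬ pvUncomfortableClose (pvInsertOne t i) = true then pvInsertOne t i else t) s
    (PySem.Chars.count final ['1'] : Int) - initialCount

-- ===== PORT B =====
def pvAltLoop : List Char → List Char → Int
  | _, [] => 0
  | prev, c :: rest =>
    let nxt : List Char := match rest with | [] => [] | d :: _ => [d]
    if prev ≠ ['1'] ∧ nxt ≠ ['1'] then
      (if c ≠ '1' then 1 else 0) + pvAltLoop ['1'] rest
    else pvAltLoop [c] rest

def get_free_urinals_alt (urinals : String) : Int :=
  let s := urinals.toList
  if PySem.Chars.isIn ['1', '1'] s then -1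
  else pvAltLoop [] s

-- ===== PRECONDITION & SPEC =====
def Spec_get_free_urinals (urinals : String) (out : Int) : Prop := out = get_free_urinals_alt urinals
instance (urinals : String) (out : Int) : Decidable (Spec_get_free_urinals urinals out) := by unfold Spec_get_free_urinals; infer_instance

-- ===== CLAIM (what is proved, stated in full; the proofs are below) =====
def Claim_equal_get_free_urinals : Prop := ∀ (urinals : String), Dom_get_free_urinals urinals → Spec_get_free_urinals urinals (get_free_urinals urinals)

-- ===== LEMMAS AND PROOFS =====

-- Boolean "some pair of adjacent '1's" used to characterise A's substring test.
def pvAdj11 : List Char → Bool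
  | a :: b :: t => (a = '1' && b = '1') || pvAdj11 (b :: t)
  | _ => false

lemma pvAdj11_iff (s : List Char) : pvAdj11 s = true ↔ ['1', '1'] <:+: s := by
  induction s with
  | nil => simp [pvAdj11]
  | cons a t ih =>
    cases t with
    | nil =>
      simp only [pvAdj11, Bool.false_eq_true, false_iff]
      intro h
      simpa using h.length_le
    | cons b t' =>
      rw [List.infix_cons_iff]
      constructor
      · intro h
        simp only [pvAdj11, Bool.or_eq_true, Bool.and_eq_true, decide_eq_true_eq] at h
        rcases h with ⟨ha, hb⟩ | h
        · exact Or.inl (by simp [ha, hb, List.cons_prefix_cons])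
        · exact Or.inr ((ih).1 h)
      · intro h
        rcases h with h | h
        · rw [List.cons_prefix_cons] at h
          rcases h with ⟨ha, h⟩
          rw [List.cons_prefix_cons] at h
          simp only [pvAdj11, Bool.or_eq_true, Bool.and_eq_true, decide_eq_true_eq]
          exact Or.inl ⟨ha.symm, h.1.symm⟩
        · simp [pvAdj11, ih.2 h]

lemma pvIsIn_eq_adj11 (s : List Char) : PySem.Chars.isIn ['1', '1'] s = pvAdj11 s := by
  by_cases h : pvAdj11 s = true
  · rw [h, (PySem.Chars.isIn_iff_infix _ _).2 ((pvAdj11_iff s).1 h)]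
  · rw [Bool.eq_false_iff.2 h]
    rw [Bool.eq_false_iff]
    intro hin
    exact h ((pvAdj11_iff s).2 ((PySem.Chars.isIn_iff_infix _ _).1 hin))

lemma pvAdj11_append (xs ys : List Char) :
    pvAdj11 (xs ++ ys) =
      (pvAdj11 xs || (xs.getLast? == some '1' && ys.head? == some '1') || pvAdj11 ys) := by
  induction xs with
  | nil => simp [pvAdj11]
  | cons a xs ih =>
    cases xs with
    | nil =>
      cases ys with
      | nil => simp [pvAdj11]
      | cons b t => simp [pvAdj11, Bool.beq_eq_decide_eq]
    | cons b t =>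
      simp only [List.cons_append] at *
      rw [show pvAdj11 (a :: b :: (t ++ ys)) = ((a = '1' && b = '1') || pvAdj11 (b :: (t ++ ys))) from by
            simp [pvAdj11], ih]
      rw [show pvAdj11 (a :: b :: t) = ((a = '1' && b = '1') || pvAdj11 (b :: t)) from by
            simp [pvAdj11]]
      rw [List.getLast?_cons_cons]
      cases pvAdj11 (b :: t) <;> cases pvAdj11 ys <;> simp

-- Python str.count with a single-character needle is plain character count.
lemma pvCount_go_one (fuel : Nat) : ∀ (l : List Char) (acc : Nat), l.length ≤ fuel →
    PySem.Chars.count.go ['1'] fuel l acc = acc + l.count '1' := by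
  induction fuel with
  | zero =>
    intro l acc h
    have : l = [] := List.eq_nil_of_length_eq_zero (Nat.le_zero.1 h)
    subst this
    simp [PySem.Chars.count.go]
  | succ n ih =>
    intro l acc h
    cases l with
    | nil => simp [PySem.Chars.count.go]
    | cons c t =>
      simp only [List.length_cons, Nat.succ_le_succ_iff] at h
      rw [PySem.Chars.count.go]
      by_cases hc : c = '1'
      · subst hc
        have hpre : List.isPrefixOf ['1'] ('1' :: t) = true := by
          simp [List.isPrefixOf]
        simp only [hpre, if_true, List.length_cons, List.length_nil]
        rw [List.drop_one, List.tail_cons, ih t (acc + 1) h]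
        rw [List.count_cons]
        simp
        omega
      · have hpre : List.isPrefixOf ['1'] (c :: t) = false := by
          rw [Bool.eq_false_iff]
          intro h'
          rw [List.isPrefixOf_iff_prefix, List.cons_prefix_cons] at h'
          exact hc h'.1.symm
        simp only [hpre, Bool.false_eq_true, if_false]
        rw [ih t acc h]
        rw [List.count_cons]
        simp [hc]

lemma pvCount_one (s : List Char) : PySem.Chars.count s ['1'] = s.count '1' := by
  simp only [PySem.Chars.count, List.isEmpty_cons, Bool.false_eq_true, if_false]
  simpa using pvCount_go_one s.length s 0 le_rfl

-- Inserting '1' at the position right after `done` replaces that cell.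
lemma pvInsertOne_at (done rs : List Char) (c : Char) :
    pvInsertOne (done ++ c :: rs) (done.length : Int) = done ++ '1' :: rs := by
  unfold pvInsertOne
  rw [PySem.List.slice_to _ (by positivity), PySem.List.slice_from _ (by positivity)]
  have h1 : ((done.length : Int)).toNat = done.length := by simp
  have h2 : ((done.length : Int) + 1).toNat = done.length + 1 := by omega
  rw [h1, h2]
  have ht : List.take done.length (done ++ c :: rs) = done := List.take_left
  have hd : List.drop (done.length + 1) (done ++ c :: rs) = rs := by
    have : done ++ c :: rs = (done ++ [c]) ++ rs := by simp
    rw [this]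
    have hl : (done ++ [c]).length = done.length + 1 := by simp
    rw [← hl, List.drop_left]
  rw [ht, hd]
  simp

-- prev-cell representation carried by B's pass, as a function of A's processed prefix.
def pvPrevRep (done : List Char) : List Char :=
  match done.getLast? with
  | none => []
  | some c => [c]

lemma pvPrevRep_eq_one_iff (done : List Char) :
    pvPrevRep done = ['1'] ↔ done.getLast? = some '1' := by
  unfold pvPrevRep
  cases h : done.getLast? with
  | none => simp
  | some c => simp

lemma pvNxt_eq_one_iff (rs : List Char) :
    (match rs with | [] => ([] : List Char) | d :: _ => [d]) = ['1'] ↔ rs.head? = some '1' := by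
  cases rs <;> simp

lemma pvAltLoop_cons (prev : List Char) (c : Char) (rest : List Char) :
    pvAltLoop prev (c :: rest) =
      (if prev ≠ ['1'] ∧ (match rest with | [] => ([] : List Char) | d :: _ => [d]) ≠ ['1'] then
        (if c ≠ '1' then 1 else 0) + pvAltLoop ['1'] rest
      else pvAltLoop [c] rest) := rfl

-- The heart of the equivalence: A's indexed greedy loop over the zipper (done, rest)
-- produces exactly B's incremental count.
lemma pvLoop_main : ∀ (rest done : List Char), pvAdj11 (done ++ rest) = false →
    (((PySem.List.pyRange (done.length : Int) ((done.length + rest.length : Nat) : Int)).foldl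
        (fun t i => if ¬ pvUncomfortableClose (pvInsertOne t i) = true then pvInsertOne t i else t)
        (done ++ rest)).count '1' : Int)
      = (done.count '1' : Int) + (rest.count '1' : Int) + pvAltLoop (pvPrevRep done) rest := by
  intro rest
  induction rest with
  | nil =>
    intro done h
    simp [pvAltLoop, PySem.List.pyRange]
  | cons c rs ih =>
    intro done h
    have hlt : (done.length : Int) < ((done.length + (c :: rs).length : Nat) : Int) := by
      simp
    rw [PySem.List.pyRange_one_cons hlt, List.foldl_cons]
    have happ := pvAdj11_append done (c :: rs)
    rw [h] at happ
    have hdone : pvAdj11 done = false := by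
      cases hx : pvAdj11 done
      · rfl
      · rw [hx] at happ; simp at happ
    have hcrs : pvAdj11 (c :: rs) = false := by
      cases hx : pvAdj11 (c :: rs)
      · rfl
      · rw [hx] at happ; simp at happ
    have hrs : pvAdj11 rs = false := by
      have hap := pvAdj11_append [c] rs
      simp only [List.singleton_append] at hap
      rw [hcrs] at hap
      cases hx : pvAdj11 rs
      · rfl
      · rw [hx] at hap; simp at hap
    have h1rs : pvAdj11 ('1' :: rs) = ((rs.head? == some '1') || pvAdj11 rs) := by
      have hap := pvAdj11_append ['1'] rs
      simp only [List.singleton_append] at hap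
      rw [hap]
      simp [pvAdj11]
    rw [pvInsertOne_at done rs c]
    have hcand : pvUncomfortableClose (done ++ '1' :: rs) =
        ((done.getLast? == some '1') || (rs.head? == some '1')) := by
      rw [pvUncomfortableClose, pvIsIn_eq_adj11, pvAdj11_append, hdone, h1rs, hrs]
      simp
    have hlen : ((done.length : Int) + 1) = (((done ++ [c]).length : Nat) : Int) := by simp
    have hlen' : ((done.length : Int) + 1) = (((done ++ ['1']).length : Nat) : Int) := by simp
    have hlen2 : ((done.length + (c :: rs).length : Nat) : Int) = (((done ++ [c]).length + rs.length : Nat) : Int) := by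
      simp; omega
    have hlen2' : ((done.length + (c :: rs).length : Nat) : Int) = (((done ++ ['1']).length + rs.length : Nat) : Int) := by
      simp; omega
    have hstep : done ++ c :: rs = (done ++ [c]) ++ rs := by simp
    have hstep' : done ++ '1' :: rs = (done ++ ['1']) ++ rs := by simp
    by_cases hL : done.getLast? = some '1'
    · -- prev cell is '1': no insertion
      rw [hcand, if_neg (by simp [hL])]
      rw [hstep, hlen, hlen2, ih (done ++ [c]) (by rw [← hstep]; exact h)]
      have hprev : pvPrevRep (done ++ [c]) = [c] := by
        unfold pvPrevRep; simp
      have halt : pvAltLoop (pvPrevRep done) (c :: rs) = pvAltLoop [c] rs := by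
        rw [pvAltLoop_cons, if_neg]
        intro hcon
        exact hcon.1 ((pvPrevRep_eq_one_iff done).2 hL)
      rw [hprev, halt]
      simp only [List.count_append, List.count_cons, List.count_nil, Nat.zero_add]
      push_cast
      ring
    · by_cases hH : rs.head? = some '1'
      · -- next cell is '1': no insertion
        rw [hcand, if_neg (by simp [hH])]
        rw [hstep, hlen, hlen2, ih (done ++ [c]) (by rw [← hstep]; exact h)]
        have hprev : pvPrevRep (done ++ [c]) = [c] := by
          unfold pvPrevRep; simp
        have halt : pvAltLoop (pvPrevRep done) (c :: rs) = pvAltLoop [c] rs := by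
          rw [pvAltLoop_cons, if_neg]
          intro hcon
          exact hcon.2 ((pvNxt_eq_one_iff rs).2 hH)
        rw [hprev, halt]
        simp only [List.count_append, List.count_cons, List.count_nil, Nat.zero_add]
        push_cast
        ring
      · -- both neighbours free: the cell is upgraded to '1'
        rw [hcand, if_pos (by simp [hL, hH])]
        have hnew : pvAdj11 ((done ++ ['1']) ++ rs) = false := by
          rw [← hstep', pvAdj11_append, hdone, h1rs, hrs]
          simp [hL, hH]
        rw [hstep', hlen', hlen2', ih (done ++ ['1']) hnew]
        have hprev : pvPrevRep (done ++ ['1']) = ['1'] := by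
          unfold pvPrevRep; simp
        have halt : pvAltLoop (pvPrevRep done) (c :: rs) =
            (if c ≠ '1' then 1 else 0) + pvAltLoop ['1'] rs := by
          rw [pvAltLoop_cons, if_pos]
          exact ⟨fun h1 => hL ((pvPrevRep_eq_one_iff done).1 h1),
                fun h2 => hH ((pvNxt_eq_one_iff rs).1 h2)⟩
        rw [hprev, halt]
        simp only [List.count_append, List.count_cons, List.count_nil, Nat.zero_add]
        push_cast
        by_cases hc1 : c = '1'
        · subst hc1
          simp
          ring
        · simp [hc1]
          ring

-- ===== VERDICT (by name: the statement is the Claim_ definition above) =====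
theorem get_free_urinals_spec : Claim_equal_get_free_urinals := by
  intro urinals _
  unfold Spec_get_free_urinals get_free_urinals get_free_urinals_alt
  simp only []
  set s := urinals.toList with hs
  by_cases h11 : PySem.Chars.isIn ['1', '1'] s = true
  · rw [if_pos h11]
    rw [show pvUncomfortableClose s = true from h11, if_pos rfl]
  · rw [if_neg h11]
    rw [show pvUncomfortableClose s = PySem.Chars.isIn ['1', '1'] s from rfl,
        if_neg h11]
    have hadj : pvAdj11 s = false := by
      rw [← pvIsIn_eq_adj11]
      exact Bool.eq_false_iff.2 h11
    have hmain := pvLoop_main s [] (by simpa using hadj)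
    simp only [List.nil_append, List.length_nil, List.count_nil,
      Nat.cast_zero, zero_add] at hmain
    rw [pvCount_one, pvCount_one]
    rw [show pvPrevRep [] = [] from rfl] at hmain
    omega
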